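-- pv_equiv track=rewrite | github.com/skiphuang919/python_trick | ele2.py | _gen_container_list
-- ===== SOURCE A (Python) =====
-- def _gen_container_list(data_list):
--     max_i = max(data_list)
--     res = []
--     for row_num in list(range(1, max_i + 1))[::-1]:
--         row = []
--         for item in data_list:
--             if item >= row_num:
--                 row.append('#')
--             else:
--                 row.append('_')
--         res.append(row)
--     return res
-- ===== SOURCE B (Python) =====
-- def _gen_container_list(data_list):
--     max_i = max(data_list)
--     columns = [['#' if item >= rn else '_' for rn in range(max_i, 0, -1)]
--                for item in data_list]
--     return [list(row) for row in zip(*columns)]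
-- ===== Notes on version B (the rewrite author's own statement) =====
-- stated objective: alternative
-- what changed: B builds the chart column-major (one column comprehension per data item over range(max_i,0,-1)) and transposes with zip(*columns), instead of A's row-major nested loops with explicit append accumulators.
import Mathlib
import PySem

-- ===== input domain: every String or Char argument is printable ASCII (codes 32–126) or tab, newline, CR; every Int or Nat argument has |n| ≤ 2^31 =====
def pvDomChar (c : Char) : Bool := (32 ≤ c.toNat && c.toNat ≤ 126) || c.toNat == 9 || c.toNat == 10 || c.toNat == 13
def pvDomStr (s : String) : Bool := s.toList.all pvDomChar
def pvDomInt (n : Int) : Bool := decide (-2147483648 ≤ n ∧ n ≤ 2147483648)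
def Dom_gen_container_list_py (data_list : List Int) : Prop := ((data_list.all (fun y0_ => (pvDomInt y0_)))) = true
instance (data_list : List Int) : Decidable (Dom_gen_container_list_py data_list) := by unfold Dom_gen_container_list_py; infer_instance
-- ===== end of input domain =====

-- B builds the bar chart column-major and transposes with zip(*columns); A builds it row-major
-- with nested append loops. Equivalence is proved for every nonempty list (max raises otherwise).

-- ===== PORT A =====
def gen_container_list_py (data_list : List Int) : List (List String) :=
  match PySem.List.max? data_list (fun x => x) with
  | none => []   -- unreachable under Pre_: max([]) raises ValueError
  | some max_i =>
    ((PySem.List.slice? (PySem.List.pyRange 1 (max_i + 1) 1) none none (-1)).getD []).foldl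
      (fun res row_num =>
        res ++ [data_list.foldl (fun row item => row ++ [if item ≥ row_num then "#" else "_"]) []])
      []

-- ===== PORT B =====
-- zip(*columns): yields rows until the shortest column is exhausted (exact port of Python zip)
def pyZipAux (c : List String) (cs : List (List String)) : List (List String) :=
  match c with
  | [] => []
  | x :: xtl =>
    if cs.any List.isEmpty then []
    else (x :: cs.map (fun l => l.headI)) :: pyZipAux xtl (cs.map List.tail)

def pyZipStar : List (List String) → List (List String)
  | [] => []
  | c :: cs => pyZipAux c cs

def gen_container_list_py_alt (data_list : List Int) : List (List String) :=
  match PySem.List.max? data_list (fun x => x) with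
  | none => []   -- unreachable under Pre_: max([]) raises ValueError
  | some max_i =>
    pyZipStar (data_list.map (fun item =>
      (PySem.List.pyRange max_i 0 (-1)).map (fun rn => if item ≥ rn then "#" else "_")))

-- ===== PRECONDITION & SPEC =====
-- Pre_ excludes exactly the empty list, on which max() raises ValueError (in A and in B alike).
def Pre_gen_container_list_py (data_list : List Int) : Prop := data_list ≠ []
instance (data_list : List Int) : Decidable (Pre_gen_container_list_py data_list) := by unfold Pre_gen_container_list_py; infer_instance
def pvWitness_gen_container_list_py : List Int := [2, 0, 3]

def Spec_gen_container_list_py (data_list : List Int) (out : List (List String)) : Prop := out = gen_container_list_py_alt data_list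
instance (data_list : List Int) (out : List (List String)) : Decidable (Spec_gen_container_list_py data_list out) := by unfold Spec_gen_container_list_py; infer_instance

-- ===== CLAIM (what is proved, stated in full; the proofs are below) =====
def Claim_equal_gen_container_list_py : Prop := ∀ (data_list : List Int), Dom_gen_container_list_py data_list → Pre_gen_container_list_py data_list → Spec_gen_container_list_py data_list (gen_container_list_py data_list)

-- ===== LEMMAS AND PROOFS =====

-- A's nested append loops compute the row-major map of maps.
lemma portA_eq (data_list : List Int) (max_i : Int) :
    ((PySem.List.slice? (PySem.List.pyRange 1 (max_i + 1) 1) none none (-1)).getD []).foldl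
      (fun res row_num =>
        res ++ [data_list.foldl (fun row item => row ++ [if item ≥ row_num then "#" else "_"]) []])
      []
    = (PySem.List.pyRange max_i 0 (-1)).map
        (fun rn => data_list.map (fun item => if item ≥ rn then "#" else "_")) := by
  rw [PySem.List.slice?_none_none_neg_one, PySem.List.pyRange_neg_one_eq_reverse]
  simp only [Option.getD_some, zero_add]
  rw [PySem.List.foldl_append_singleton_eq_map]
  simp only [List.nil_append]
  refine List.map_congr_left (fun rn _ => ?_)
  rw [PySem.List.foldl_append_singleton_eq_map]
  simp

-- transposing equal-length columns yields the row-major map of maps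
lemma pyZipAux_map (g : Int → Int → String) (rns : List Int) (d : Int) (ds : List Int) :
    pyZipAux (rns.map (g d)) (ds.map (fun item => rns.map (g item)))
    = rns.map (fun rn => (d :: ds).map (fun item => g item rn)) := by
  induction rns generalizing ds with
  | nil => simp [pyZipAux]
  | cons rn rest ih =>
    simp only [List.map_cons, pyZipAux, List.any_map]
    rw [if_neg (by simp)]
    congr 1
    · simp [List.map_map, Function.comp]
    · rw [show (ds.map (fun item => g item rn :: rest.map (g item))).map List.tail
            = ds.map (fun item => rest.map (g item)) by simp [List.map_map]]
      exact ih ds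

lemma pyZipStar_map (g : Int → Int → String) (rns : List Int) (data : List Int)
    (h : data ≠ []) :
    pyZipStar (data.map (fun item => rns.map (g item)))
    = rns.map (fun rn => data.map (fun item => g item rn)) := by
  cases data with
  | nil => exact absurd rfl h
  | cons d ds =>
    simp only [List.map_cons, pyZipStar]
    exact pyZipAux_map g rns d ds

-- ===== VERDICT (by name: the statement is the Claim_ definition above) =====
theorem gen_container_list_py_spec : Claim_equal_gen_container_list_py := by
  intro data_list _ hpre
  unfold Spec_gen_container_list_py gen_container_list_py gen_container_list_py_alt
  cases hmax : PySem.List.max? data_list (fun x => x) with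
  | none => rfl
  | some max_i =>
    simp only
    rw [portA_eq, pyZipStar_map (fun item rn => if item ≥ rn then "#" else "_") _ _ hpre]
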